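-- pv_equiv track=rewrite | github.com/yashwanth-3000/brainrot | Backend/brainrot_backend/video_generator/services/agents.py | _replace_narration_opening
-- ===== SOURCE A (Python) =====
-- def _replace_narration_opening(narration_text: str, opening_sentence: str) -> str:
--     normalized = " ".join(narration_text.split()).strip()
--     if not normalized:
--         return opening_sentence
--     sentence_breaks = [index for index in (normalized.find(". "), normalized.find("? "), normalized.find("! ")) if index != -1]
--     if sentence_breaks:
--         first_break = min(sentence_breaks)
--         remainder = normalized[first_break + 2 :].strip()
--         return f"{opening_sentence} {remainder}".strip()
--     return f"{opening_sentence} {normalized}".strip()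
-- ===== SOURCE B (Python) =====
-- def _replace_narration_opening(narration_text: str, opening_sentence: str) -> str:
--     normalized = " ".join(narration_text.split()).strip()
--     if not normalized:
--         return opening_sentence
--     rest = normalized
--     for i in range(len(normalized) - 1):
--         if normalized[i] in ".?!" and normalized[i + 1] == " ":
--             rest = normalized[i + 2:].strip()
--             break
--     return f"{opening_sentence} {rest}".strip()
-- ===== Notes on version B (the rewrite author's own statement) =====
-- stated objective: alternative
-- what changed: Replaced A's three full-string substring finds ('. ', '? ', '! ') plus list-comprehension filter and min() with a single early-stopping left-to-right scan that stops at the first '.'/'?'/'!' immediately followed by a space.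
import Mathlib
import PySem

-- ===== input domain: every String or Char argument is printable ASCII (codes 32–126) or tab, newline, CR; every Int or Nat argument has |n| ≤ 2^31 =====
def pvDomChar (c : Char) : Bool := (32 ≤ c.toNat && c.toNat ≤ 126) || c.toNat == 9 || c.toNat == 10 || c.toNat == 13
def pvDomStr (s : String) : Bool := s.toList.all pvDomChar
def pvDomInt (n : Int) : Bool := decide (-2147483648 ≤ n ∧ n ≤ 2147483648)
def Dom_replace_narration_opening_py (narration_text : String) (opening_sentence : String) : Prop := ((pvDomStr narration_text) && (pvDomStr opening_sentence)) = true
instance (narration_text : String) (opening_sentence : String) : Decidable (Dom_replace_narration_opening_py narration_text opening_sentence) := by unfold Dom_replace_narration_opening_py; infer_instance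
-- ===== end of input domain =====

-- B replaces A's three full substring-find passes plus min() by a single early-stopping
-- left-to-right scan for the first '.'/'?'/'!' followed by a space (objective: alternative).

-- ===== PORT A =====
-- body of A after the line 'normalized = " ".join(narration_text.split()).strip()'
def pyACore (normalized : String) (opening_sentence : String) : String :=
  if normalized = "" then opening_sentence
  else
    let sentence_breaks :=
      ([PySem.Str.find normalized ". ", PySem.Str.find normalized "? ",
        PySem.Str.find normalized "! "]).filter (fun i => i ≠ -1)
    match PySem.List.min? sentence_breaks (fun x => x) with
    | some first_break =>
        let remainder := PySem.Str.strip (PySem.Str.slice normalized (some (first_break + 2)) none)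
        PySem.Str.strip (PySem.Str.join " " [opening_sentence, remainder])
    | none => PySem.Str.strip (PySem.Str.join " " [opening_sentence, normalized])

def replace_narration_opening_py (narration_text : String) (opening_sentence : String) : String :=
  pyACore (PySem.Str.strip (PySem.Str.join " " (PySem.Str.split₀ narration_text))) opening_sentence

-- ===== PORT B =====
-- B's scan loop: first i with normalized[i] ∈ ".?!" and normalized[i+1] = ' ';
-- returns the chars after the break (normalized[i+2:]) if one is found.
def altScan : List Char → Option (List Char)
  | c :: d :: t =>
      if (c = '.' ∨ c = '?' ∨ c = '!') ∧ d = ' ' then some t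
      else altScan (d :: t)
  | _ => none

-- body of B after the shared normalization line
def pyBCore (normalized : String) (opening_sentence : String) : String :=
  if normalized = "" then opening_sentence
  else
    let rest : String :=
      match altScan normalized.toList with
      | some t => String.ofList (PySem.Chars.strip t)
      | none => normalized
    PySem.Str.strip (PySem.Str.join " " [opening_sentence, rest])

def replace_narration_opening_py_alt (narration_text : String) (opening_sentence : String) : String :=
  pyBCore (PySem.Str.strip (PySem.Str.join " " (PySem.Str.split₀ narration_text))) opening_sentence

-- ===== PRECONDITION & SPEC =====
def Spec_replace_narration_opening_py (narration_text : String) (opening_sentence : String) (out : String) : Prop := out = replace_narration_opening_py_alt narration_text opening_sentence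
instance (narration_text : String) (opening_sentence : String) (out : String) : Decidable (Spec_replace_narration_opening_py narration_text opening_sentence out) := by unfold Spec_replace_narration_opening_py; infer_instance

-- ===== CLAIM (what is proved, stated in full; the proofs are below) =====
def Claim_equal_replace_narration_opening_py : Prop := ∀ (narration_text : String) (opening_sentence : String), Dom_replace_narration_opening_py narration_text opening_sentence → Spec_replace_narration_opening_py narration_text opening_sentence (replace_narration_opening_py narration_text opening_sentence)

-- ===== LEMMAS AND PROOFS =====

theorem altScan_none_no_infix (c : Char) (hc : c = '.' ∨ c = '?' ∨ c = '!') :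
    ∀ cs : List Char, altScan cs = none → ¬ [c, ' '] <:+: cs := by
  intro cs
  induction cs with
  | nil => intro _ hinf; simpa using hinf.length_le
  | cons a tail ih =>
    cases tail with
    | nil => intro _ hinf; simpa using hinf.length_le
    | cons b t =>
      intro h hinf
      unfold altScan at h
      split_ifs at h with hcond
      rcases List.infix_cons_iff.mp hinf with hpre | hinf'
      · obtain ⟨hca, hrest⟩ := List.cons_prefix_cons.mp hpre
        obtain ⟨hsb, -⟩ := List.cons_prefix_cons.mp hrest
        exact hcond ⟨by rw [← hca]; exact hc, hsb.symm⟩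
      · exact ih h hinf'

theorem altScan_some_spec :
    ∀ cs t : List Char, altScan cs = some t →
    ∃ i : Nat, ∃ c : Char, (c = '.' ∨ c = '?' ∨ c = '!') ∧
      [c, ' '] <+: cs.drop i ∧ t = cs.drop (i + 2) ∧
      (∀ j < i, ∀ c' : Char, (c' = '.' ∨ c' = '?' ∨ c' = '!') → ¬ [c', ' '] <+: cs.drop j) := by
  intro cs
  induction cs with
  | nil => intro t h; simp [altScan] at h
  | cons a tail ih =>
    cases tail with
    | nil => intro t h; simp [altScan] at h
    | cons b t' =>
      intro t h
      unfold altScan at h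
      split_ifs at h with hcond
      · refine ⟨0, a, hcond.1, ?_, ?_, by omega⟩
        · simp [List.cons_prefix_cons, hcond.2]
        · simpa using (Option.some_inj.mp h).symm
      · obtain ⟨i, c, hc, hpre, ht, hmin⟩ := ih t h
        refine ⟨i + 1, c, hc, by simpa using hpre, by simpa using ht, ?_⟩
        intro j hj c' hc' hp
        cases j with
        | zero =>
          obtain ⟨hca, hsb⟩ : c' = a ∧ ' ' = b := by simpa using hp
          exact hcond ⟨by rw [← hca]; exact hc', hsb.symm⟩
        | succ k => exact hmin k (by omega) c' hc' (by simpa using hp)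

theorem core_eq (s o : String) : pyACore s o = pyBCore s o := by
  unfold pyACore pyBCore
  by_cases hempty : s = ""
  · simp [hempty]
  · simp only [if_neg hempty]
    cases hscan : altScan s.toList with
    | none =>
      have hf : ∀ c : Char, (c = '.' ∨ c = '?' ∨ c = '!') →
          PySem.Chars.find s.toList [c, ' '] = -1 := fun c hc =>
        (PySem.Chars.find_eq_neg_one_iff _ _).mpr (altScan_none_no_infix c hc s.toList hscan)
      have h1 := hf '.' (by tauto)
      have h2 := hf '?' (by tauto)
      have h3 := hf '!' (by tauto)
      simp [PySem.Str.find_eq, show (". ":String).toList = ['.',' '] from rfl,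
            show ("? ":String).toList = ['?',' '] from rfl,
            show ("! ":String).toList = ['!',' '] from rfl, h1, h2, h3,
            PySem.List.min?]
    | some t =>
      obtain ⟨i, c, hc, hpre, ht, hmin⟩ := altScan_some_spec s.toList t hscan
      -- the find for the break char equals i
      have hfind_c : PySem.Chars.find s.toList [c, ' '] = (i : Int) := by
        have hinf : [c, ' '] <:+: s.toList :=
          hpre.isInfix.trans (List.drop_suffix i s.toList).isInfix
        have hge0 : 0 ≤ PySem.Chars.find s.toList [c, ' '] :=
          (PySem.Chars.find_nonneg_iff _ _).mpr hinf
        obtain ⟨hp, hmin'⟩ := PySem.Chars.find_spec hge0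
        have heq : (PySem.Chars.find s.toList [c, ' ']).toNat = i := by
          rcases lt_trichotomy (PySem.Chars.find s.toList [c, ' ']).toNat i with hlt | he | hgt
          · exact absurd hp (hmin _ hlt c hc)
          · exact he
          · exact absurd hpre (hmin' i hgt)
        omega
      -- every non-(-1) find is ≥ i
      have hge : ∀ c' : Char, (c' = '.' ∨ c' = '?' ∨ c' = '!') →
          PySem.Chars.find s.toList [c', ' '] ≠ -1 →
          (i : Int) ≤ PySem.Chars.find s.toList [c', ' '] := by
        intro c' hc' hne
        have hle := PySem.Chars.neg_one_le_find s.toList [c', ' ']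
        have hge0 : 0 ≤ PySem.Chars.find s.toList [c', ' '] := by omega
        obtain ⟨hp, -⟩ := PySem.Chars.find_spec hge0
        by_contra hlt
        exact hmin (PySem.Chars.find s.toList [c', ' ']).toNat (by omega) c' hc' hp
      -- the breaks list and its min
      have hbr : ([PySem.Str.find s ". ", PySem.Str.find s "? ",
          PySem.Str.find s "! "].filter (fun i => i ≠ -1)) =
          ([PySem.Chars.find s.toList ['.',' '], PySem.Chars.find s.toList ['?',' '],
            PySem.Chars.find s.toList ['!',' ']].filter (fun i => i ≠ -1)) := by
        simp [PySem.Str.find_eq, show (". ":String).toList = ['.',' '] from rfl,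
              show ("? ":String).toList = ['?',' '] from rfl,
              show ("! ":String).toList = ['!',' '] from rfl]
      have hmem : (i : Int) ∈ ([PySem.Chars.find s.toList ['.',' '],
          PySem.Chars.find s.toList ['?',' '],
          PySem.Chars.find s.toList ['!',' ']].filter (fun i => i ≠ -1)) := by
        have hpred : (fun i : Int => decide (i ≠ -1)) (i : Int) = true := by simp
        rcases hc with h | h | h <;> subst h <;>
          exact List.mem_filter.mpr ⟨by rw [← hfind_c]; simp, hpred⟩
      have hminq : PySem.List.min? ([PySem.Chars.find s.toList ['.',' '],
          PySem.Chars.find s.toList ['?',' '],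
          PySem.Chars.find s.toList ['!',' ']].filter (fun i => i ≠ -1)) (fun x => x)
          = some (i : Int) := by
        cases hm : PySem.List.min? ([PySem.Chars.find s.toList ['.',' '],
            PySem.Chars.find s.toList ['?',' '],
            PySem.Chars.find s.toList ['!',' ']].filter (fun i => i ≠ -1)) (fun x => x) with
        | none =>
          exfalso
          rw [PySem.List.min?_eq_none_iff] at hm
          rw [hm] at hmem; simp at hmem
        | some m =>
          have hmmem := PySem.List.min?_mem hm
          have hmle := PySem.List.min?_isMin hm (i : Int) hmem
          have hmge : (i : Int) ≤ m := by
            have := List.mem_filter.mp hmmem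
            obtain ⟨hin, hne⟩ := this
            simp only [List.mem_cons, List.not_mem_nil, or_false] at hin
            have hne' : m ≠ -1 := by simpa using hne
            rcases hin with h | h | h <;> subst h
            · exact hge '.' (by tauto) hne'
            · exact hge '?' (by tauto) hne'
            · exact hge '!' (by tauto) hne'
          have : m = (i : Int) := le_antisymm hmle hmge
          exact congrArg some this
      rw [hbr, hminq]
      -- reduce the remainder
      have hrem : PySem.Str.strip (PySem.Str.slice s (some ((i : Int) + 2)) none)
          = String.ofList (PySem.Chars.strip t) := by
        rw [← String.toList_inj]
        rw [PySem.Str.toList_strip, PySem.Str.toList_slice]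
        have h2 : (i : Int) + 2 = ((i + 2 : Nat) : Int) := by push_cast; ring
        rw [h2]
        simp only [PySem.Chars.slice_eq_listSlice, PySem.List.slice_from_natCast]
        rw [← ht]
        simp [String.toList_ofList]
      exact congrArg (fun r => PySem.Str.strip (PySem.Str.join " " [o, r])) hrem

-- ===== VERDICT (by name: the statement is the Claim_ definition above) =====
theorem replace_narration_opening_py_spec : Claim_equal_replace_narration_opening_py := by
  intro n o _
  unfold Spec_replace_narration_opening_py replace_narration_opening_py replace_narration_opening_py_alt
  exact core_eq _ o
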